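-- pv_equiv track=rewrite | github.com/StonyBrookNLP/deformer | common/text.py | get_valid_windows
-- ===== SOURCE A (Python) =====
-- def get_valid_windows(num_tokens, max_num_tokens, window_stride):
--     # use sliding window to take tokens within max_context_tokens limit, e.g.:
--     # get_valid_windows(300, 317, 128) ==> [(0, 300)]
--     # get_valid_windows(400, 317, 128) ==> [(0, 317), (128, 400)]
--     # get_valid_windows(700, 317, 128) ==> [(0, 317), (128, 445), (256, 573),
--     # (384, 700)]
--     window_spans = []
--     start_offset = 0
--     if window_stride is None or window_stride < 0:
--         window_stride = 0
--     while start_offset < num_tokens: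
--         length = num_tokens - start_offset
--         if length > max_num_tokens:
--             length = max_num_tokens
--         window_spans.append((start_offset, start_offset + length))
--         if start_offset + length == num_tokens or window_stride == 0:
--             break
--         start_offset += min(length, window_stride)
--     return window_spans
-- ===== SOURCE B (Python) =====
-- def get_valid_windows(num_tokens, max_num_tokens, window_stride):
--     if num_tokens <= 0:
--         return []
--     if window_stride is None or window_stride <= 0 or num_tokens <= max_num_tokens:
--         return [(0, min(num_tokens, max_num_tokens))]
--     s = min(max_num_tokens, window_stride)
--     n = (num_tokens - max_num_tokens + s - 1) // s + 1
--     return [(i * s, min(i * s + max_num_tokens, num_tokens)) for i in range(n)]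
-- ===== Notes on version B (the rewrite author's own statement) =====
-- stated objective: alternative
-- what changed: Replaces the accumulate-and-break while loop by a closed-form ceil-division window count n plus a range comprehension producing each span arithmetically; degenerate cases (empty, zero/negative/None stride, everything fits) are early returns. Pre_ only excludes the inputs (num_tokens>0, max_num_tokens<=0, positive stride) on which A loops forever.
import Mathlib
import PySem

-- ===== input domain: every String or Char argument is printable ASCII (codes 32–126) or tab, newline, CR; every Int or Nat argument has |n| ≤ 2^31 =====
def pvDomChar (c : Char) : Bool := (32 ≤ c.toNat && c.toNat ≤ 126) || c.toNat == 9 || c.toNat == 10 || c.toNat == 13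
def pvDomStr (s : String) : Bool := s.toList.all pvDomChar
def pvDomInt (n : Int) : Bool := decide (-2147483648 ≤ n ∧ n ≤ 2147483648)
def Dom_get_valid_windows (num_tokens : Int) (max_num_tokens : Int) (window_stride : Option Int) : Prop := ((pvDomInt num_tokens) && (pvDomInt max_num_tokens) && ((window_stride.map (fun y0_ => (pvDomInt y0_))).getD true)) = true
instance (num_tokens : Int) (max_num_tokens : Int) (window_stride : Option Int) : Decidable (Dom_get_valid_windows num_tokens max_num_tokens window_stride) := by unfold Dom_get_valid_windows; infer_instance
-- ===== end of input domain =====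

-- B replaces A's accumulate-and-break while loop by a closed-form ceil-division window
-- count plus a range comprehension (objective: alternative decomposition, same cost).

-- ===== PORT A =====
-- fuel-bounded transcription of A's while loop; fuel num_tokens.toNat+1 suffices on
-- every input admitted by Pre_ (each non-final iteration advances start by ≥ 1)
def gvwLoop (num maxT stride : Int) : Nat → Int → List (Int × Int) → List (Int × Int)
  | 0, _, acc => acc
  | fuel+1, start, acc =>
    if start < num then
      let len0 := num - start
      let length := if len0 > maxT then maxT else len0
      let acc2 := acc ++ [(start, start + length)]
      if start + length = num ∨ stride = 0 then acc2
      else gvwLoop num maxT stride fuel (start + min length stride) acc2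
    else acc

def get_valid_windows (num_tokens : Int) (max_num_tokens : Int) (window_stride : Option Int) : List (Int × Int) :=
  let stride := match window_stride with
    | none => 0
    | some s => if s < 0 then 0 else s
  gvwLoop num_tokens max_num_tokens stride (num_tokens.toNat + 1) 0 []

-- ===== PORT B =====
def get_valid_windows_alt (num_tokens : Int) (max_num_tokens : Int) (window_stride : Option Int) : List (Int × Int) :=
  if num_tokens ≤ 0 then []
  else if (match window_stride with | none => true | some s => decide (s ≤ 0))
          || decide (num_tokens ≤ max_num_tokens) then
    [(0, min num_tokens max_num_tokens)]
  else
    let s := min max_num_tokens (window_stride.getD 0)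
    let n := PySem.Int.floordiv (num_tokens - max_num_tokens + s - 1) s + 1
    (PySem.List.pyRange 0 n 1).map (fun i => (i * s, min (i * s + max_num_tokens) num_tokens))

-- ===== PRECONDITION & SPEC =====
-- Pre_ excludes exactly the inputs on which A's while loop never terminates
-- (num_tokens > 0, max_num_tokens ≤ 0 and a positive stride: start never advances).
def Pre_get_valid_windows (num_tokens : Int) (max_num_tokens : Int) (window_stride : Option Int) : Prop :=
  (0 < num_tokens ∧ 0 < window_stride.getD 0) → 0 < max_num_tokens
instance (num_tokens : Int) (max_num_tokens : Int) (window_stride : Option Int) : Decidable (Pre_get_valid_windows num_tokens max_num_tokens window_stride) := by unfold Pre_get_valid_windows; infer_instance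

def pvWitness_get_valid_windows : Int × Int × Option Int := (7, 3, some 2)

def Spec_get_valid_windows (num_tokens : Int) (max_num_tokens : Int) (window_stride : Option Int) (out : List (Int × Int)) : Prop := out = get_valid_windows_alt num_tokens max_num_tokens window_stride
instance (num_tokens : Int) (max_num_tokens : Int) (window_stride : Option Int) (out : List (Int × Int)) : Decidable (Spec_get_valid_windows num_tokens max_num_tokens window_stride out) := by unfold Spec_get_valid_windows; infer_instance

-- ===== CLAIM (what is proved, stated in full; the proofs are below) =====
def Claim_equal_get_valid_windows : Prop := ∀ (num_tokens : Int) (max_num_tokens : Int) (window_stride : Option Int), Dom_get_valid_windows num_tokens max_num_tokens window_stride → Pre_get_valid_windows num_tokens max_num_tokens window_stride → Spec_get_valid_windows num_tokens max_num_tokens window_stride (get_valid_windows num_tokens max_num_tokens window_stride)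

-- ===== LEMMAS AND PROOFS =====

-- ceiling-division bracket: q = (a+s-1)//s satisfies a ≤ q*s ≤ a+s-1  (s > 0)
lemma gvw_ceil_bracket (a s : Int) (hs : 0 < s) :
    a ≤ PySem.Int.floordiv (a + s - 1) s * s ∧
    PySem.Int.floordiv (a + s - 1) s * s ≤ a + s - 1 := by
  rw [PySem.Int.floordiv_eq_ediv_of_pos hs]
  have h1 := Int.ediv_add_emod (a + s - 1) s
  have h2 := Int.emod_nonneg (a + s - 1) (ne_of_gt hs)
  have h3 := Int.emod_lt_of_pos (a + s - 1) hs
  rw [mul_comm]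
  omega

lemma gvw_loop_eq (num maxT st s q : Int) (hm : 0 < maxT) (hst : 0 < st)
    (hs : s = min maxT st)
    (hq : q = PySem.Int.floordiv (num - maxT + s - 1) s)
    (_hlt : maxT < num) :
    ∀ (fuel : Nat) (i : Int) (acc : List (Int × Int)), 0 ≤ i → i ≤ q → i * s < num →
      (num - i * s).toNat ≤ fuel →
      gvwLoop num maxT st fuel (i * s) acc
        = acc ++ (PySem.List.pyRange i (q + 1) 1).map
            (fun j => (j * s, min (j * s + maxT) num)) := by
  have hs0 : 0 < s := by rw [hs]; exact lt_min hm hst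
  have hsm : s ≤ maxT := by rw [hs]; exact min_le_left _ _
  obtain ⟨hb1, hb2⟩ := gvw_ceil_bracket (num - maxT) s hs0
  rw [← hq] at hb1 hb2
  intro fuel
  induction fuel with
  | zero => intro i acc _ _ hi hf; omega
  | succ m ih =>
    intro i acc hi0 hiq hi hf
    rw [gvwLoop]
    rw [if_pos hi]
    simp only [letFun]
    by_cases hbig : num - i * s > maxT
    · -- non-final window: length = maxT, recurse
      rw [if_pos hbig]
      have hne : ¬ (i * s + maxT = num ∨ st = 0) := by
        push_neg; exact ⟨by omega, by omega⟩
      rw [if_neg hne]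
      have hmin : min maxT st = s := hs.symm
      have hilt : i < q := by
        by_contra h
        have : i = q := by omega
        subst this
        omega
      have hstep : i * s + min maxT st = (i + 1) * s := by rw [hmin]; ring
      rw [hstep]
      have h1 : (i + 1) * s < num := by nlinarith
      have hrec := ih (i + 1) (acc ++ [(i * s, i * s + maxT)]) (by omega) (by omega) h1
        (by
          have : (i + 1) * s = i * s + s := by ring
          omega)
      rw [hrec]
      conv_rhs => rw [PySem.List.pyRange_one_cons (show i < q + 1 by omega), List.map_cons]
      have hmin2 : min (i * s + maxT) num = i * s + maxT := by omega
      rw [hmin2, List.append_assoc, List.singleton_append]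
    · -- final window: length = num - i*s, break
      rw [if_neg hbig]
      rw [if_pos (Or.inl (by omega))]
      have hiq' : i = q := by
        by_contra h
        have hle : i ≤ q - 1 := by omega
        have : i * s ≤ (q - 1) * s := by nlinarith
        nlinarith
      rw [hiq']
      rw [PySem.List.pyRange_one_singleton, List.map_singleton]
      have hmin2 : min (q * s + maxT) num = num := by omega
      rw [hmin2]
      have hlen : q * s + (num - q * s) = num := by omega
      rw [hlen]

lemma gvw_single (num maxT st : Int) (h0 : 0 < num) (hstop : st = 0 ∨ num ≤ maxT) (fuel : Nat) :
    gvwLoop num maxT st (fuel + 1) 0 [] = [(0, min num maxT)] := by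
  rw [gvwLoop, if_pos h0]
  simp only [letFun]
  by_cases hle : num - 0 > maxT
  · rw [if_pos hle]
    have hst : st = 0 := by rcases hstop with h | h <;> omega
    rw [if_pos (Or.inr hst)]
    have hmin : min num maxT = maxT := by omega
    simp [hmin]
  · rw [if_neg hle]
    rw [if_pos (Or.inl (by omega))]
    have hmin : min num maxT = num := by omega
    simp [hmin]

theorem get_valid_windows_spec : Claim_equal_get_valid_windows := by
  intro num maxT ws _ hpre
  unfold Pre_get_valid_windows at hpre
  unfold Spec_get_valid_windows
  cases ws with
  | none =>
    simp only [get_valid_windows, get_valid_windows_alt, Option.getD_none,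
      Bool.true_or, if_true]
    by_cases hn : num ≤ 0
    · rw [if_pos hn, gvwLoop, if_neg (by omega)]
    · rw [if_neg hn, gvw_single num maxT 0 (by omega) (Or.inl rfl)]
  | some st =>
    simp only [get_valid_windows, get_valid_windows_alt, Option.getD_some]
    by_cases hn : num ≤ 0
    · rw [if_pos hn, gvwLoop, if_neg (by omega)]
    · rw [if_neg hn]
      by_cases hst : st ≤ 0
      · have hs0 : (if st < 0 then (0:Int) else st) = 0 := by split_ifs <;> omega
        rw [hs0, gvw_single num maxT 0 (by omega) (Or.inl rfl)]
        rw [if_pos (by simp; omega)]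
      · by_cases hlt : num ≤ maxT
        · have hsp : (if st < 0 then (0:Int) else st) = st := by split_ifs <;> omega
          rw [hsp, gvw_single num maxT st (by omega) (Or.inr hlt)]
          rw [if_pos (by simp; omega)]
        · have hstpos : 0 < st := by omega
          have hmaxpos : 0 < maxT := hpre ⟨by omega, by simpa using hstpos⟩
          have hsp : (if st < 0 then (0:Int) else st) = st := by split_ifs <;> omega
          rw [hsp, if_neg (by simp; omega)]
          have hs0 : 0 < min maxT st := lt_min hmaxpos hstpos
          obtain ⟨hb1, _⟩ := gvw_ceil_bracket (num - maxT) (min maxT st) hs0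
          have key := gvw_loop_eq num maxT st (min maxT st)
            (PySem.Int.floordiv (num - maxT + min maxT st - 1) (min maxT st))
            hmaxpos hstpos rfl rfl (by omega) (num.toNat + 1) 0 []
            le_rfl
            (by nlinarith)
            (by omega)
            (by omega)
          rw [zero_mul] at key
          rw [key]
          simp
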